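-- pv_equiv track=rewrite | github.com/lsx88so/pythontest | python3/sdlutils/asn1utils.py | calcTag
-- ===== SOURCE A (Python) =====
-- def calcTag(cl, pc, tagv):
--     #tagClass = {"00": "UNIVERSAL", "01": "APPLICATION", "10": "CONTEXT_SPECIFIC", "11": "PRIVATE"}
--     #tagType = {"0": "PRIMITIVE", "1": "CONSTRUCTED"}
--     tag = 0
--     if cl == 0:
--         tag = tag | 0x0
--     elif cl == 1:
--         tag = tag | 0x40
--     elif cl == 2:
--         tag = tag | 0x80
--     elif cl == 3:
--         tag = tag | 0xC0
--     else:
--         return None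
--
--     if pc == 0:
--         tag = tag | 0x0
--     elif pc == 1:
--         tag = tag | 0x20
--     else:
--         return None
--
--     if tagv < 31:
--         tag = tag | tagv
--     else:
--         tag = tag | 0x1F
--         vBin = bin(tagv).lstrip('0b')[::-1]
--
--         vBinLen = len(vBin)
--         vBinT = vBinLen // 7
--         if vBinT > 7:
--             return None
--         tmpBin = ""
--         for i in range(vBinT + 1):
--             if i == vBinT and i == 0:
--                 tmpBin = "0" + vBin[i * 7:][::-1].zfill(7) + tmpBin
--             elif i == vBinT and i != 0:
--                 tmpBin = "1" + vBin[i * 7:][::-1].zfill(7) + tmpBin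
--             elif i == 0:
--                 tmpBin = "0" + vBin[0:7][::-1] + tmpBin
--             else:
--                 tmpBin = "1" + vBin[i * 7:(i + 1) * 7][::-1] + tmpBin
--         tmpBin = bin(tag).lstrip('0b') + tmpBin
--         tag = int(tmpBin, 2)
--     return hex(tag).lstrip("0x").upper()
-- ===== SOURCE B (Python) =====
-- # Same encoder, but the long form is assembled numerically (shift/or) instead of
-- # via binary-string slicing/reversal/zfill and int(...,2) re-parsing.
--
-- def _fmt(n):
--     return hex(n).lstrip("0x").upper()
--
-- def calcTag(cl, pc, tagv):
--     _CLASS = {0: 0x00, 1: 0x40, 2: 0x80, 3: 0xC0}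
--     if cl not in _CLASS or pc not in (0, 1):
--         return None
--     base = _CLASS[cl] | (0x20 if pc == 1 else 0x0)
--     if tagv < 31:
--         return _fmt(base | tagv)
--     groups = tagv.bit_length() // 7
--     if groups > 7:
--         return None
--     result = base | 0x1F
--     for i in range(groups, -1, -1):
--         byte = (tagv >> (7 * i)) & 0x7F
--         if i != 0:
--             byte |= 0x80
--         result = (result << 8) | byte
--     return _fmt(result)
-- ===== Notes on version B (the rewrite author's own statement) =====
-- stated objective: simpler
-- what changed: The long-form branch assembles the encoded tag numerically (shift/mask/or over 7-bit groups of an integer) instead of building, slicing, reversing and zero-filling binary strings and re-parsing them with int(...,2); the class/pc dispatch becomes a table lookup.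
import Mathlib
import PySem

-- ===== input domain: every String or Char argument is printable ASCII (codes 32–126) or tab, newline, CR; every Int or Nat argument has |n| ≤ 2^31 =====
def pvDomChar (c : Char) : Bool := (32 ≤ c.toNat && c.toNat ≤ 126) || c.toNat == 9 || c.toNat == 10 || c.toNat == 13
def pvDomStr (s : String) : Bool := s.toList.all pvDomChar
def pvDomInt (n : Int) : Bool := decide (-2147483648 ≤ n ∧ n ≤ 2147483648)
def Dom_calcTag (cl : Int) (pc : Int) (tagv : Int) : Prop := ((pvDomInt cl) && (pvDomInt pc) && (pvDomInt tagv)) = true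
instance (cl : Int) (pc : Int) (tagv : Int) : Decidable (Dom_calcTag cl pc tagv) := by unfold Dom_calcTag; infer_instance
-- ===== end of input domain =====

-- B assembles the BER long-form tag numerically (shift/mask over 7-bit groups) instead of
-- A's binary-string building/slicing/zfill plus int(...,2) re-parsing; return values agree everywhere.

-- Shared ports of Python numeric-string builtins (PySem has no hex() and no str.lstrip(chars);
-- bin()/int(s,2) are ported by hand in the same style — exact on the inputs these programs feed them):

-- binary digits of n, least-significant first ('0'/'1' chars)
def pvBitsLE (n : Nat) : List Char :=
  if h : n = 0 then [] else (if n % 2 = 1 then '1' else '0') :: pvBitsLE (n / 2)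
decreasing_by exact Nat.div_lt_self (Nat.pos_of_ne_zero h) one_lt_two

def pvBinDigits (n : Nat) : List Char := if n = 0 then ['0'] else (pvBitsLE n).reverse

-- bin(n) as a char list ("0b…" / "-0b…")
def pyBin0b (n : Int) : List Char :=
  if n < 0 then '-' :: '0' :: 'b' :: pvBinDigits n.natAbs else '0' :: 'b' :: pvBinDigits n.toNat

-- int(cs, 2) for a nonempty list of '0'/'1' chars (the only shape A feeds it): positional base-2 fold
def pvParseBin (cs : List Char) : Nat := cs.foldl (fun a c => 2 * a + (if c = '1' then 1 else 0)) 0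

def pvHexLE (n : Nat) : List Char :=
  if h : n = 0 then [] else Nat.digitChar (n % 16) :: pvHexLE (n / 16)
decreasing_by exact Nat.div_lt_self (Nat.pos_of_ne_zero h) (by omega)

def pvHexDigits (n : Nat) : List Char := if n = 0 then ['0'] else (pvHexLE n).reverse

-- hex(n).lstrip("0x").upper()  (lstrip strips the CHARS '0','x' from the left — Python-exact, incl. n ≤ 0)
def pyHexLstripUpper (n : Int) : String :=
  let s := if n < 0 then '-' :: '0' :: 'x' :: pvHexDigits n.natAbs else '0' :: 'x' :: pvHexDigits n.toNat
  String.ofList (PySem.Chars.upper (s.dropWhile (fun c => c == '0' || c == 'x')))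

-- ===== PORT A =====
-- the long-form (tagv ≥ 31) tail of A, after tag |= 0x1F
def calcTagLong (tag : Int) (tagv : Int) : Option String :=
  let vBin := ((pyBin0b tagv).dropWhile (fun c => c == '0' || c == 'b')).reverse  -- bin(tagv).lstrip('0b')[::-1]
  let vBinLen : Int := vBin.length
  let vBinT : Int := PySem.Int.floordiv vBinLen 7
  if vBinT > 7 then none
  else
    let tmpBin : List Char :=
      (PySem.List.pyRange 0 (vBinT + 1) 1).foldl (fun tmpBin i =>
        if i = vBinT ∧ i = 0 then
          ('0' :: PySem.Chars.zfill (PySem.List.slice vBin (some (i * 7)) none).reverse 7) ++ tmpBin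
        else if i = vBinT ∧ i ≠ 0 then
          ('1' :: PySem.Chars.zfill (PySem.List.slice vBin (some (i * 7)) none).reverse 7) ++ tmpBin
        else if i = 0 then
          ('0' :: (PySem.List.slice vBin (some 0) (some 7)).reverse) ++ tmpBin
        else
          ('1' :: (PySem.List.slice vBin (some (i * 7)) (some ((i + 1) * 7))).reverse) ++ tmpBin) []
    let tmpBin := (pyBin0b tag).dropWhile (fun c => c == '0' || c == 'b') ++ tmpBin
    let tagF : Int := pvParseBin tmpBin   -- int(tmpBin, 2): tmpBin is a nonempty '0'/'1' string here
    some (pyHexLstripUpper tagF)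

def calcTagV (tag : Int) (tagv : Int) : Option String :=
  if tagv < 31 then some (pyHexLstripUpper (PySem.Int.bor tag tagv))
  else calcTagLong (PySem.Int.bor tag 0x1F) tagv

def calcTagPc (tag : Int) (pc : Int) (tagv : Int) : Option String :=
  if pc = 0 then calcTagV (PySem.Int.bor tag 0x0) tagv
  else if pc = 1 then calcTagV (PySem.Int.bor tag 0x20) tagv
  else none

def calcTag (cl : Int) (pc : Int) (tagv : Int) : Option String :=
  if cl = 0 then calcTagPc (PySem.Int.bor 0 0x0) pc tagv
  else if cl = 1 then calcTagPc (PySem.Int.bor 0 0x40) pc tagv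
  else if cl = 2 then calcTagPc (PySem.Int.bor 0 0x80) pc tagv
  else if cl = 3 then calcTagPc (PySem.Int.bor 0 0xC0) pc tagv
  else none

-- ===== PORT B =====
def calcTag_alt (cl : Int) (pc : Int) (tagv : Int) : Option String :=
  let cls : PySem.Dict Int Int := PySem.Dict.ofList [(0, 0x00), (1, 0x40), (2, 0x80), (3, 0xC0)]
  if PySem.Dict.contains cls cl = false ∨ ¬(pc = 0 ∨ pc = 1) then none
  else
    let base := PySem.Int.bor (PySem.Dict.getD cls cl 0) (if pc = 1 then 0x20 else 0x0)  -- _CLASS[cl]: key present here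
    if tagv < 31 then some (pyHexLstripUpper (PySem.Int.bor base tagv))
    else
      let groups : Int := PySem.Int.floordiv ((PySem.Int.bitLength tagv : Nat) : Int) 7
      if groups > 7 then none
      else
        let result := PySem.Int.bor base 0x1F
        let result := (PySem.List.pyRange groups (-1) (-1)).foldl (fun r i =>
          let byte := PySem.Int.band (tagv >>> (7 * i).toNat) 0x7F  -- tagv >> (7*i); i ≥ 0 along range(groups,-1,-1), where Python would raise on a negative shift
          let byte := if i ≠ 0 then PySem.Int.bor byte 0x80 else byte
          PySem.Int.bor (r <<< (8 : Nat)) byte) result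
        some (pyHexLstripUpper result)

-- ===== PRECONDITION & SPEC =====
def Spec_calcTag (cl : Int) (pc : Int) (tagv : Int) (out : Option String) : Prop := out = calcTag_alt cl pc tagv
instance (cl : Int) (pc : Int) (tagv : Int) (out : Option String) : Decidable (Spec_calcTag cl pc tagv out) := by unfold Spec_calcTag; infer_instance

-- ===== CLAIM (what is proved, stated in full; the proofs are below) =====
def Claim_equal_calcTag : Prop := ∀ (cl : Int) (pc : Int) (tagv : Int), Dom_calcTag cl pc tagv → Spec_calcTag cl pc tagv (calcTag cl pc tagv)

-- ===== LEMMAS AND PROOFS =====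

-- proof helpers --------------------------------------------------------------

-- B's tail after the class/pc dispatch (used only by the proofs)
def pvBcore (base : Int) (tagv : Int) : Option String :=
  if tagv < 31 then some (pyHexLstripUpper (PySem.Int.bor base tagv))
  else
    let groups : Int := PySem.Int.floordiv ((PySem.Int.bitLength tagv : Nat) : Int) 7
    if groups > 7 then none
    else
      let result := PySem.Int.bor base 0x1F
      let result := (PySem.List.pyRange groups (-1) (-1)).foldl (fun r i =>
        let byte := PySem.Int.band (tagv >>> (7 * i).toNat) 0x7F
        let byte := if i ≠ 0 then PySem.Int.bor byte 0x80 else byte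
        PySem.Int.bor (r <<< (8 : Nat)) byte) result
      some (pyHexLstripUpper result)

-- the value of the i-th 7-bit group byte (marker bit included)
def pvByte (n i : Nat) : Nat := (if i = 0 then 0 else 128) + n / 2 ^ (i * 7) % 128

-- the i-th chunk string A's loop prepends
def pvG (v : List Char) (m i : Nat) : List Char :=
  if i = m then (if i = 0 then '0' else '1') :: PySem.Chars.zfill (v.drop (i * 7)).reverse 7
  else if i = 0 then '0' :: (v.take 7).reverse
  else '1' :: ((v.drop (i * 7)).take 7).reverse

-- basic facts ----------------------------------------------------------------

lemma pvBitsLE_zero : pvBitsLE 0 = [] := by rw [pvBitsLE]; simp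

lemma pvBitsLE_eq (n : Nat) (h : n ≠ 0) :
    pvBitsLE n = (if n % 2 = 1 then '1' else '0') :: pvBitsLE (n / 2) := by
  rw [pvBitsLE]; simp [h]

lemma pvParseBin_foldl (l : List Char) (a : Nat) :
    l.foldl (fun a c => 2 * a + (if c = '1' then 1 else 0)) a = a * 2 ^ l.length + pvParseBin l := by
  induction l generalizing a with
  | nil => simp [pvParseBin]
  | cons c t ih =>
    simp only [List.foldl_cons, List.length_cons]
    have hc : pvParseBin (c :: t) = t.foldl (fun a c => 2 * a + (if c = '1' then 1 else 0)) (2 * 0 + (if c = '1' then 1 else 0)) := rfl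
    rw [ih, hc, ih, pow_succ]; ring

lemma pvParseBin_append (s t : List Char) :
    pvParseBin (s ++ t) = pvParseBin s * 2 ^ t.length + pvParseBin t := by
  show (s ++ t).foldl _ 0 = _
  rw [List.foldl_append]
  exact pvParseBin_foldl t (s.foldl _ 0)

lemma pvParseBin_cons (c : Char) (t : List Char) :
    pvParseBin (c :: t) = (if c = '1' then 1 else 0) * 2 ^ t.length + pvParseBin t := by
  have h := pvParseBin_append [c] t
  simpa [pvParseBin] using h

lemma pvParseBin_replicate (z : Nat) (t : List Char) :
    pvParseBin (List.replicate z '0' ++ t) = pvParseBin t := by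
  rw [pvParseBin_append]
  have : pvParseBin (List.replicate z '0') = 0 := by
    induction z with
    | zero => rfl
    | succ k ih =>
      have : List.replicate (k+1) '0' = '0' :: List.replicate k '0' := rfl
      rw [this, pvParseBin_cons, ih]; simp
  rw [this]; simp

lemma pvBitsLE_drop (k : Nat) : ∀ n, (pvBitsLE n).drop k = pvBitsLE (n / 2 ^ k) := by
  induction k with
  | zero => intro n; simp
  | succ k ih =>
    intro n
    by_cases h : n = 0
    · subst h; simp [pvBitsLE_zero]
    · rw [pvBitsLE_eq n h]
      have : ((if n % 2 = 1 then '1' else '0') :: pvBitsLE (n / 2)).drop (k+1) = (pvBitsLE (n / 2)).drop k := rfl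
      rw [this, ih (n / 2), Nat.div_div_eq_div_mul]
      congr 1
      rw [pow_succ]; ring_nf

lemma pvParseBin_take_rev (k : Nat) :
    ∀ n, pvParseBin (((pvBitsLE n).take k).reverse) = n % 2 ^ k := by
  induction k with
  | zero => intro n; simp [pvParseBin, Nat.mod_one]
  | succ k ih =>
    intro n
    by_cases h : n = 0
    · subst h; simp [pvBitsLE_zero, pvParseBin]
    · rw [pvBitsLE_eq n h]
      have ht : ((if n % 2 = 1 then '1' else '0') :: pvBitsLE (n / 2)).take (k+1)
          = (if n % 2 = 1 then '1' else '0') :: (pvBitsLE (n / 2)).take k := rfl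
      rw [ht, List.reverse_cons, pvParseBin_append, ih (n / 2)]
      have hb : pvParseBin [if n % 2 = 1 then '1' else '0'] = n % 2 := by
        by_cases h2 : n % 2 = 1 <;> simp [pvParseBin, h2] <;> omega
      rw [hb]
      have hm : n % 2 ^ (k + 1) = n % 2 + 2 * (n / 2 % 2 ^ k) := by
        have h2 := @Nat.mod_mul 2 (2 ^ k) n
        have h3 : 2 ^ (k + 1) = 2 * 2 ^ k := by rw [pow_succ]; ring
        rw [h3, h2]
      simp only [List.length_singleton, pow_one]
      omega

lemma pvBitsLE_lt (n : Nat) : n < 2 ^ (pvBitsLE n).length := by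
  induction n using Nat.strong_induction_on with
  | _ n ih =>
    by_cases h : n = 0
    · subst h; simp [pvBitsLE_zero]
    · rw [pvBitsLE_eq n h]
      have := ih (n / 2) (Nat.div_lt_self (Nat.pos_of_ne_zero h) one_lt_two)
      simp only [List.length_cons, pow_succ]
      omega

lemma pvBitsLE_len_le (k : Nat) : ∀ n, n < 2 ^ k → (pvBitsLE n).length ≤ k := by
  induction k with
  | zero =>
    intro n h
    have : n = 0 := by omega
    subst this; simp [pvBitsLE_zero]
  | succ k ih =>
    intro n h
    by_cases h0 : n = 0
    · subst h0; simp [pvBitsLE_zero]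
    · rw [pvBitsLE_eq n h0]
      have : n / 2 < 2 ^ k := by
        rw [Nat.div_lt_iff_lt_mul (by norm_num)]
        calc n < 2 ^ (k+1) := h
        _ = 2 ^ k * 2 := by rw [pow_succ]
      simpa using ih (n / 2) this

lemma pvParseBin_rev (n : Nat) : pvParseBin ((pvBitsLE n).reverse) = n := by
  have h := pvParseBin_take_rev (pvBitsLE n).length n
  rw [List.take_length] at h
  rw [h, Nat.mod_eq_of_lt (pvBitsLE_lt n)]

lemma pvBitsLE_rev_head (n : Nat) (h : n ≠ 0) : ∃ r, (pvBitsLE n).reverse = '1' :: r := by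
  induction n using Nat.strong_induction_on with
  | _ n ih =>
    rw [pvBitsLE_eq n h, List.reverse_cons]
    by_cases h2 : n / 2 = 0
    · have : n = 1 := by omega
      subst this
      exact ⟨[], by simp [pvBitsLE_zero]⟩
    · obtain ⟨r, hr⟩ := ih (n / 2) (Nat.div_lt_self (Nat.pos_of_ne_zero h) one_lt_two) h2
      exact ⟨r ++ [if n % 2 = 1 then '1' else '0'], by rw [hr]; rfl⟩

lemma pvDropWhile_bin (n : Nat) (h : n ≠ 0) :
    ('0' :: 'b' :: pvBinDigits n).dropWhile (fun c => c == '0' || c == 'b') = (pvBitsLE n).reverse := by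
  obtain ⟨r, hr⟩ := pvBitsLE_rev_head n h
  simp only [pvBinDigits, h, if_false]
  rw [hr]
  simp [List.dropWhile]

lemma pvBin0b_pos (t : Int) (h : 0 ≤ t) : pyBin0b t = '0' :: 'b' :: pvBinDigits t.toNat := by
  simp [pyBin0b, not_lt.mpr h]

lemma pvBitLength_eq (n : Nat) : PySem.Int.bitLength (n : Int) = (pvBitsLE n).length := by
  induction n using Nat.strong_induction_on with
  | _ n ih =>
    by_cases h : n = 0
    · subst h; simp [pvBitsLE_zero, PySem.Int.bitLength_zero]
    · rw [PySem.Int.bitLength_natCast (Nat.pos_of_ne_zero h), pvBitsLE_eq n h,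
        ih (n / 2) (Nat.div_lt_self (Nat.pos_of_ne_zero h) one_lt_two)]
      simp

-- loop shapes ----------------------------------------------------------------

lemma pvFoldl_prepend {α β : Type} (g : α → List β) (l : List α) (init : List β) :
    l.foldl (fun acc i => g i ++ acc) init = (l.reverse.map g).flatten ++ init := by
  induction l generalizing init with
  | nil => simp
  | cons a l ih =>
    simp only [List.foldl_cons, List.reverse_cons, List.map_append, List.flatten_append]
    rw [ih]
    simp

lemma pvParse_flatten (g : Nat → List Char) (b : Nat → Nat) (l : List Nat)
    (hl : ∀ i ∈ l, (g i).length = 8 ∧ pvParseBin (g i) = b i) :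
    ∀ s, pvParseBin (s ++ (l.map g).flatten) = l.foldl (fun a i => a * 256 + b i) (pvParseBin s) := by
  induction l with
  | nil => intro s; simp
  | cons i l ih =>
    intro s
    have hi := hl i (by simp)
    have hl' : ∀ j ∈ l, (g j).length = 8 ∧ pvParseBin (g j) = b j := fun j hj => hl j (by simp [hj])
    simp only [List.map_cons, List.flatten_cons, List.foldl_cons]
    rw [← List.append_assoc, ih hl' (s ++ g i), pvParseBin_append, hi.1, hi.2]
    norm_num

lemma pvPyRange_desc (m : Nat) :
    PySem.List.pyRange (m : Int) (-1) (-1) = ((List.range (m + 1)).reverse).map (fun j : Nat => (j : Int)) := by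
  induction m with
  | zero =>
    rw [PySem.List.pyRange_neg_one_cons (by norm_num), PySem.List.pyRange_neg_one_eq_nil (by norm_num)]
    simp
  | succ m ih =>
    have hc : ((m + 1 : Nat) : Int) = (m : Int) + 1 := by push_cast; ring
    rw [hc, PySem.List.pyRange_neg_one_cons (by omega)]
    have : (m : Int) + 1 - 1 = (m : Int) := by ring
    rw [this, ih]
    rw [show List.range (m + 1 + 1) = List.range (m + 1) ++ [m + 1] from List.range_succ]
    simp [List.map_reverse]

-- zfill on an unsigned digit string is a left pad with '0'
lemma pvZfill_bits (cs : List Char) (h7 : cs.length ≤ 7)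
    (hh : cs = [] ∨ ∃ r, cs = '1' :: r) :
    PySem.Chars.zfill cs 7 = List.replicate (7 - cs.length) '0' ++ cs := by
  rcases hh with h | ⟨r, h⟩ <;> subst h
  · simp [PySem.Chars.zfill]
  · by_cases hc : ('1' :: r).length = 7
    · rw [PySem.Chars.zfill, if_pos (by exact_mod_cast le_of_eq hc.symm), hc]
      simp
    · rw [PySem.Chars.zfill,
        if_neg (by exact_mod_cast (by omega : ¬ ((7:Int) ≤ (('1'::r).length : Int))))]
      simp

-- B's loop body, on casts of naturals, is one base-256 digit step
lemma pvStep (n r i : Nat) :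
    PySem.Int.bor (((r : Int)) <<< (8 : Nat))
      (if (i : Int) ≠ 0 then
        PySem.Int.bor (PySem.Int.band ((n : Int) >>> (((7 * (i : Int)).toNat : Int))) 0x7F) 0x80
       else PySem.Int.band ((n : Int) >>> (((7 * (i : Int)).toNat : Int))) 0x7F) =
    ((r * 256 + pvByte n i : Nat) : Int) := by
  have h1 : (7 * (i : Int)) = ((7 * i : Nat) : Int) := by push_cast; ring
  have hand : ∀ x : Nat, x &&& 127 = x % 128 := by
    intro x
    have := Nat.and_two_pow_sub_one_eq_mod x 7
    norm_num at this
    exact this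
  have hx : PySem.Int.band ((n : Int) >>> (((7 * (i : Int)).toNat : Int))) 0x7F
      = ((n / 2 ^ (i * 7) % 128 : Nat) : Int) := by
    rw [h1, Int.toNat_natCast, Int.shiftRight_natCast,
      show (0x7F : Int) = ((127 : Nat) : Int) by norm_num, PySem.Int.band_natCast,
      hand, Nat.shiftRight_eq_div_pow, Nat.mul_comm 7 i]
  have hmodlt : n / 2 ^ (i * 7) % 128 < 128 := Nat.mod_lt _ (by norm_num)
  have hbyte : (if (i : Int) ≠ 0 then
        PySem.Int.bor (PySem.Int.band ((n : Int) >>> (((7 * (i : Int)).toNat : Int))) 0x7F) 0x80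
       else PySem.Int.band ((n : Int) >>> (((7 * (i : Int)).toNat : Int))) 0x7F)
      = ((pvByte n i : Nat) : Int) := by
    by_cases hi : i = 0
    · subst hi
      rw [if_neg (by simp), hx]
      simp [pvByte]
    · rw [if_pos (by exact_mod_cast hi), hx,
        show (0x80 : Int) = ((128 : Nat) : Int) by norm_num, PySem.Int.bor_natCast]
      have hor : (128 : Nat) ||| n / 2 ^ (i * 7) % 128 = 128 + n / 2 ^ (i * 7) % 128 := by
        have := Nat.two_pow_add_eq_or_of_lt (i := 7) (b := n / 2 ^ (i * 7) % 128)
          (by norm_num [hmodlt]) 1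
        norm_num at this
        exact this.symm
      rw [Nat.lor_comm (n / 2 ^ (i * 7) % 128) 128, hor]
      simp [pvByte, hi]
  rw [hbyte, ← Int.natCast_shiftLeft, PySem.Int.bor_natCast]
  have hblt : pvByte n i < 256 := by
    unfold pvByte
    split <;> omega
  have := Nat.shiftLeft_add_eq_or_of_lt (i := 8) (b := pvByte n i) (by norm_num [hblt]) r
  rw [← this, Nat.shiftLeft_eq]

-- fold over casts commutes with a Nat-level fold
lemma pvFoldl_cast_hom (f : Int → Int → Int) (g : Nat → Nat → Nat)
    (h : ∀ r i : Nat, f (r : Int) (i : Int) = ((g r i : Nat) : Int)) :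
    ∀ (l : List Nat) (r : Nat),
      (l.map (fun j : Nat => (j : Int))).foldl f (r : Int) = ((l.foldl g r : Nat) : Int) := by
  intro l
  induction l with
  | nil => intro r; rfl
  | cons i l ih =>
    intro r
    simp only [List.map_cons, List.foldl_cons]
    rw [h r i]
    exact ih (g r i)

-- invalid class byte: the dict lookup fails
lemma pvContains_false (cl : Int) (h0 : cl ≠ 0) (h1 : cl ≠ 1) (h2 : cl ≠ 2) (h3 : cl ≠ 3) :
    PySem.Dict.contains (PySem.Dict.ofList [((0:Int), (0x00:Int)), (1, 0x40), (2, 0x80), (3, 0xC0)]) cl = false := by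
  have hitems : (PySem.Dict.ofList [((0:Int), (0x00:Int)), (1, 0x40), (2, 0x80), (3, 0xC0)]).items
      = [((0:Int), (0:Int)), (1, 64), (2, 128), (3, 192)] := by decide
  simp only [PySem.Dict.contains, hitems]
  simp
  omega

-- group facts ----------------------------------------------------------------

lemma pvGroup_facts (n : Nat) (hn : n ≠ 0) (i : Nat)
    (hi : i ≤ (pvBitsLE n).length / 7) :
    (pvG (pvBitsLE n) ((pvBitsLE n).length / 7) i).length = 8 ∧
      pvParseBin (pvG (pvBitsLE n) ((pvBitsLE n).length / 7) i) = pvByte n i := by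
  set L := (pvBitsLE n).length with hLdef
  have hL7 : L / 7 * 7 ≤ L := Nat.div_mul_le_self L 7
  by_cases him : i = L / 7
  · subst him
    set w := n / 2 ^ (L / 7 * 7) with hwdef
    have hdrop : (pvBitsLE n).drop (L / 7 * 7) = pvBitsLE w := pvBitsLE_drop _ n
    have hrem : L - L / 7 * 7 ≤ 6 := by
      have h1 := Nat.div_add_mod L 7
      have h2 : L % 7 < 7 := Nat.mod_lt _ (by norm_num)
      omega
    have hwlt : w < 2 ^ (L - L / 7 * 7) := by
      rw [hwdef, Nat.div_lt_iff_lt_mul (by positivity)]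
      calc n < 2 ^ L := pvBitsLE_lt n
        _ = 2 ^ (L - L / 7 * 7) * 2 ^ (L / 7 * 7) := by rw [← pow_add]; congr 1; omega
    have hwlt7 : w < 2 ^ 7 := lt_of_lt_of_le hwlt (Nat.pow_le_pow_right (by norm_num) (by omega))
    have hclen : ((pvBitsLE w).reverse).length ≤ 7 := by
      have := pvBitsLE_len_le (L - L / 7 * 7) w hwlt
      simp only [List.length_reverse]
      omega
    have hsh : (pvBitsLE w).reverse = [] ∨ ∃ r, (pvBitsLE w).reverse = '1' :: r := by
      by_cases hw : w = 0
      · left; simp [hw, pvBitsLE_zero]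
      · right; exact pvBitsLE_rev_head w hw
    unfold pvG
    rw [if_pos rfl, hdrop, pvZfill_bits _ hclen hsh]
    have hrlen : (List.replicate (7 - ((pvBitsLE w).reverse).length) '0' ++ (pvBitsLE w).reverse).length = 7 := by
      simp only [List.length_append, List.length_replicate, List.length_reverse] at *
      omega
    constructor
    · simp only [List.length_cons, hrlen]
    · rw [pvParseBin_cons, pvParseBin_replicate, pvParseBin_rev, hrlen]
      unfold pvByte
      rw [Nat.mod_eq_of_lt (by simpa using hwlt7)]
      by_cases hm0 : L / 7 = 0 <;> simp [hm0, hwdef]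
  · have hilt : i < L / 7 := lt_of_le_of_ne hi him
    have h1i : (i + 1) * 7 ≤ L := by
      calc (i + 1) * 7 ≤ L / 7 * 7 := by
            have : i + 1 ≤ L / 7 := hilt
            exact Nat.mul_le_mul_right 7 this
        _ ≤ L := hL7
    by_cases hi0 : i = 0
    · subst hi0
      unfold pvG
      rw [if_neg him, if_pos rfl]
      have htlen : ((pvBitsLE n).take 7).length = 7 := by
        simp only [List.length_take]
        omega
      constructor
      · simp only [List.length_cons, List.length_reverse, htlen]
      · rw [pvParseBin_cons, pvParseBin_take_rev 7 n]
        simp only [List.length_reverse, htlen]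
        unfold pvByte
        norm_num
        decide
    · unfold pvG
      rw [if_neg him, if_neg hi0, pvBitsLE_drop]
      have htlen : ((pvBitsLE (n / 2 ^ (i * 7))).take 7).length = 7 := by
        simp only [List.length_take, List.length_reverse]
        have hdl : (pvBitsLE (n / 2 ^ (i * 7))).length = L - i * 7 := by
          rw [← pvBitsLE_drop]
          simp [hLdef]
        omega
      constructor
      · simp only [List.length_cons, List.length_reverse, htlen]
      · rw [pvParseBin_cons, pvParseBin_take_rev 7 (n / 2 ^ (i * 7))]
        simp only [List.length_reverse, htlen]
        unfold pvByte
        rw [if_neg hi0]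
        norm_num

-- B's fold step over casts ---------------------------------------------------

lemma pvFold_cast (n : Nat) (l : List Nat) :
    ∀ r : Nat,
      ((l.map (fun j : Nat => (j : Int))).foldl (fun r i =>
        let byte := PySem.Int.band ((n : Int) >>> (7 * i).toNat) 0x7F
        let byte := if i ≠ 0 then PySem.Int.bor byte 0x80 else byte
        PySem.Int.bor (r <<< (8 : Nat)) byte) (r : Int)) =
      ((l.foldl (fun a i => a * 256 + pvByte n i) r : Nat) : Int) := by
  intro r
  exact pvFoldl_cast_hom _ _ (fun r i => pvStep n r i) l r

-- A's tmpBin is the flattening of the groups ---------------------------------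

lemma pvTmpBin_eq (v : List Char) (m : Nat) :
    (PySem.List.pyRange 0 ((m : Int) + 1) 1).foldl (fun tmpBin i =>
        if i = (m : Int) ∧ i = 0 then
          ('0' :: PySem.Chars.zfill (PySem.List.slice v (some (i * 7)) none).reverse 7) ++ tmpBin
        else if i = (m : Int) ∧ i ≠ 0 then
          ('1' :: PySem.Chars.zfill (PySem.List.slice v (some (i * 7)) none).reverse 7) ++ tmpBin
        else if i = 0 then
          ('0' :: (PySem.List.slice v (some 0) (some 7)).reverse) ++ tmpBin
        else
          ('1' :: (PySem.List.slice v (some (i * 7)) (some ((i + 1) * 7))).reverse) ++ tmpBin) [] =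
      (((List.range (m + 1)).reverse).map (pvG v m)).flatten := by
  have hb : ((m : Int) + 1 - 0) = ((m + 1 : Nat) : Int) := by push_cast; ring
  rw [PySem.List.pyRange_one, hb, Int.toNat_natCast, List.foldl_map]
  rw [PySem.List.foldl_congr_mem (List.range (m + 1)) _ (fun tmpBin k => pvG v m k ++ tmpBin) []
    ?_, pvFoldl_prepend, List.append_nil]
  intro tmp k hk
  have hkm : k ≤ m := by
    rw [List.mem_range] at hk
    omega
  have hcast7 : ((0 : Int) + (k : Int)) * 7 = ((k * 7 : Nat) : Int) := by push_cast; ring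
  change _ = pvG v m k ++ tmp
  by_cases hkm' : k = m
  · subst hkm'
    by_cases hk0 : k = 0
    · subst hk0
      rw [if_pos (by norm_num)]
      unfold pvG
      rw [if_pos rfl, if_pos rfl]
      rw [hcast7, PySem.List.slice_from_natCast]
    · rw [if_neg (by simp [hk0]), if_pos (by simp [hk0])]
      unfold pvG
      rw [if_pos rfl, if_neg hk0]
      rw [hcast7, PySem.List.slice_from_natCast]
  · have hne : ((0 : Int) + (k : Int)) ≠ (m : Int) := by
      simp only [zero_add, ne_eq, Nat.cast_inj]
      exact hkm'
    by_cases hk0 : k = 0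
    · subst hk0
      rw [if_neg (fun h => hne h.1), if_neg (fun h => hne h.1), if_pos (by norm_num)]
      unfold pvG
      rw [if_neg hkm', if_pos rfl]
      rw [PySem.List.slice_zero_start, show (7 : Int) = ((7 : Nat) : Int) by norm_num,
        PySem.List.slice_to_natCast]
    · have hk0' : ((0 : Int) + (k : Int)) ≠ 0 := by
        simp only [zero_add, ne_eq, Nat.cast_eq_zero]
        exact hk0
      rw [if_neg (fun h => hne h.1), if_neg (fun h => hne h.1), if_neg hk0']
      unfold pvG
      rw [if_neg hkm', if_neg hk0]
      have hcast7' : ((0 : Int) + (k : Int) + 1) * 7 = (((k + 1) * 7 : Nat) : Int) := by push_cast; ring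
      rw [hcast7, hcast7', PySem.List.slice_natCast]
      have : (k + 1) * 7 - k * 7 = 7 := by omega
      rw [this]

-- the long branch ------------------------------------------------------------

lemma pvCore_eq (base : Int) (hb : 0 ≤ base) (tagv : Int) :
    calcTagV base tagv = pvBcore base tagv := by
  by_cases hlt : tagv < 31
  · simp [calcTagV, pvBcore, hlt]
  · push_neg at hlt
    obtain ⟨n, rfl⟩ : ∃ n : Nat, tagv = (n : Int) :=
      ⟨tagv.toNat, (Int.toNat_of_nonneg (by omega)).symm⟩
    have hn0 : n ≠ 0 := by
      rintro rfl
      norm_num at hlt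
    have h7c : (7 : Int) = ((7 : Nat) : Int) := by norm_num
    have hdw : (pyBin0b ((n : Int))).dropWhile (fun c => c == '0' || c == 'b')
        = (pvBitsLE n).reverse := by
      rw [pvBin0b_pos _ (by positivity), Int.toNat_natCast]
      exact pvDropWhile_bin n hn0
    have htag : PySem.Int.bor base 31 = ((base.toNat ||| 31 : Nat) : Int) := by
      rw [PySem.Int.bor_of_nonneg hb (by norm_num)]
      rfl
    set t := base.toNat ||| 31 with htdef
    have ht0 : t ≠ 0 := by
      have h31 : (31 : Nat) ≤ 31 ||| base.toNat := Nat.left_le_or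
      have hcomm : base.toNat ||| 31 = 31 ||| base.toNat := Nat.lor_comm _ _
      omega
    have hpre : (pyBin0b ((t : Int))).dropWhile (fun c => c == '0' || c == 'b')
        = (pvBitsLE t).reverse := by
      rw [pvBin0b_pos _ (by positivity), Int.toNat_natCast]
      exact pvDropWhile_bin t ht0
    have hfl : PySem.Int.floordiv (((pvBitsLE n).length : Nat) : Int) 7
        = (((pvBitsLE n).length / 7 : Nat) : Int) := by
      rw [h7c]
      exact PySem.Int.floordiv_natCast _ _
    rw [calcTagV, if_neg (not_lt.mpr hlt)]
    simp only [calcTagLong, pvBcore, if_neg (not_lt.mpr hlt)]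
    rw [hdw, List.reverse_reverse, pvBitLength_eq n, hfl]
    by_cases hm7 : (((pvBitsLE n).length / 7 : Nat) : Int) > 7
    · rw [if_pos hm7, if_pos hm7]
    · rw [if_neg hm7, if_neg hm7]
      have hl : ∀ i ∈ (List.range ((pvBitsLE n).length / 7 + 1)).reverse,
          (pvG (pvBitsLE n) ((pvBitsLE n).length / 7) i).length = 8 ∧
            pvParseBin (pvG (pvBitsLE n) ((pvBitsLE n).length / 7) i) = pvByte n i := by
        intro i hi
        simp only [List.mem_reverse, List.mem_range] at hi
        exact pvGroup_facts n hn0 i (by omega)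
      rw [pvTmpBin_eq (pvBitsLE n) ((pvBitsLE n).length / 7), htag, hpre,
        pvParse_flatten _ _ _ hl ((pvBitsLE t).reverse), pvParseBin_rev t,
        pvPyRange_desc ((pvBitsLE n).length / 7),
        pvFold_cast n ((List.range ((pvBitsLE n).length / 7 + 1)).reverse) t]

-- dispatch -------------------------------------------------------------------

lemma pvAlt_valid (cl pc tagv : Int) (b : Int)
    (hcl : PySem.Dict.contains (PySem.Dict.ofList [((0:Int), (0x00:Int)), (1, 0x40), (2, 0x80), (3, 0xC0)]) cl = true)
    (hpc : pc = 0 ∨ pc = 1)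
    (hb : b = PySem.Int.bor (PySem.Dict.getD (PySem.Dict.ofList [((0:Int), (0x00:Int)), (1, 0x40), (2, 0x80), (3, 0xC0)]) cl 0) (if pc = 1 then 0x20 else 0x0)) :
    calcTag_alt cl pc tagv = pvBcore b tagv := by
  subst hb
  simp only [calcTag_alt]
  rw [if_neg (by
    rintro (h | h)
    · rw [hcl] at h
      exact absurd h (by norm_num)
    · exact h hpc)]
  rfl

-- ===== VERDICT (by name: the statement is the Claim_ definition above) =====
theorem calcTag_spec : Claim_equal_calcTag := by
  intro cl pc tagv _
  show calcTag cl pc tagv = calcTag_alt cl pc tagv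
  by_cases hp : pc = 0 ∨ pc = 1
  · by_cases hcl4 : cl = 0 ∨ cl = 1 ∨ cl = 2 ∨ cl = 3
    · rcases hcl4 with rfl | rfl | rfl | rfl <;> rcases hp with rfl | rfl
      · rw [show calcTag 0 0 tagv = calcTagV (PySem.Int.bor (PySem.Int.bor 0 0) 0x0) tagv from by norm_num [calcTag, calcTagPc],
          show PySem.Int.bor (PySem.Int.bor 0 0) 0x0 = (0 : Int) from by decide,
          pvCore_eq (0 : Int) (by norm_num) tagv,
          ← pvAlt_valid 0 0 tagv 0 (by decide) (by norm_num) (by decide)]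
      · rw [show calcTag 0 1 tagv = calcTagV (PySem.Int.bor (PySem.Int.bor 0 0) 0x20) tagv from by norm_num [calcTag, calcTagPc],
          show PySem.Int.bor (PySem.Int.bor 0 0) 0x20 = (32 : Int) from by decide,
          pvCore_eq (32 : Int) (by norm_num) tagv,
          ← pvAlt_valid 0 1 tagv 32 (by decide) (by norm_num) (by decide)]
      · rw [show calcTag 1 0 tagv = calcTagV (PySem.Int.bor (PySem.Int.bor 0 0x40) 0x0) tagv from by norm_num [calcTag, calcTagPc],
          show PySem.Int.bor (PySem.Int.bor 0 0x40) 0x0 = (64 : Int) from by decide,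
          pvCore_eq (64 : Int) (by norm_num) tagv,
          ← pvAlt_valid 1 0 tagv 64 (by decide) (by norm_num) (by decide)]
      · rw [show calcTag 1 1 tagv = calcTagV (PySem.Int.bor (PySem.Int.bor 0 0x40) 0x20) tagv from by norm_num [calcTag, calcTagPc],
          show PySem.Int.bor (PySem.Int.bor 0 0x40) 0x20 = (96 : Int) from by decide,
          pvCore_eq (96 : Int) (by norm_num) tagv,
          ← pvAlt_valid 1 1 tagv 96 (by decide) (by norm_num) (by decide)]
      · rw [show calcTag 2 0 tagv = calcTagV (PySem.Int.bor (PySem.Int.bor 0 0x80) 0x0) tagv from by norm_num [calcTag, calcTagPc],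
          show PySem.Int.bor (PySem.Int.bor 0 0x80) 0x0 = (128 : Int) from by decide,
          pvCore_eq (128 : Int) (by norm_num) tagv,
          ← pvAlt_valid 2 0 tagv 128 (by decide) (by norm_num) (by decide)]
      · rw [show calcTag 2 1 tagv = calcTagV (PySem.Int.bor (PySem.Int.bor 0 0x80) 0x20) tagv from by norm_num [calcTag, calcTagPc],
          show PySem.Int.bor (PySem.Int.bor 0 0x80) 0x20 = (160 : Int) from by decide,
          pvCore_eq (160 : Int) (by norm_num) tagv,
          ← pvAlt_valid 2 1 tagv 160 (by decide) (by norm_num) (by decide)]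
      · rw [show calcTag 3 0 tagv = calcTagV (PySem.Int.bor (PySem.Int.bor 0 0xC0) 0x0) tagv from by norm_num [calcTag, calcTagPc],
          show PySem.Int.bor (PySem.Int.bor 0 0xC0) 0x0 = (192 : Int) from by decide,
          pvCore_eq (192 : Int) (by norm_num) tagv,
          ← pvAlt_valid 3 0 tagv 192 (by decide) (by norm_num) (by decide)]
      · rw [show calcTag 3 1 tagv = calcTagV (PySem.Int.bor (PySem.Int.bor 0 0xC0) 0x20) tagv from by norm_num [calcTag, calcTagPc],
          show PySem.Int.bor (PySem.Int.bor 0 0xC0) 0x20 = (224 : Int) from by decide,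
          pvCore_eq (224 : Int) (by norm_num) tagv,
          ← pvAlt_valid 3 1 tagv 224 (by decide) (by norm_num) (by decide)]
    · push_neg at hcl4
      obtain ⟨h0, h1, h2, h3⟩ := hcl4
      have hA : calcTag cl pc tagv = none := by
        simp only [calcTag, if_neg h0, if_neg h1, if_neg h2, if_neg h3]
      have hB : calcTag_alt cl pc tagv = none := by
        simp only [calcTag_alt]
        rw [if_pos (Or.inl (pvContains_false cl h0 h1 h2 h3))]
      rw [hA, hB]
  · push_neg at hp
    obtain ⟨hp0, hp1⟩ := hp
    have hA : calcTag cl pc tagv = none := by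
      simp only [calcTag, calcTagPc]
      split_ifs <;> simp_all
    have hB : calcTag_alt cl pc tagv = none := by
      simp only [calcTag_alt]
      rw [if_pos (Or.inr (not_or.mpr ⟨hp0, hp1⟩))]
    rw [hA, hB]
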